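-- pv_equiv track=rewrite | github.com/MattMcPartlon/pdb-utils | pdb_dataset/io/pdb_io.py | get_ss_blocks
-- ===== SOURCE A (Python) =====
-- from typing import Optional, List, Tuple
--
-- def get_ss_blocks(sec_struc: str) -> Tuple[List[List[int]], List[str]]:
--     """Partition secondary structure into contiguous blocks
--
--     Returns:
--             ss_blocks
--             where ss_blocks[i] = index of residues constituting block i
--             ss_labels
--             where ss_labels[i] = the secondary structure label of residues in block i
--     """
--     ss_blocks, ss_block, block_labels = [], [0], []
--     for i in range(1, len(sec_struc)):
--         if sec_struc[i] == sec_struc[i - 1]: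
--             ss_block.append(i)
--         else:
--             ss_blocks.append(ss_block)
--             block_labels.append(sec_struc[i - 1])
--             ss_block = [i]
--     ss_blocks.append(ss_block)
--     block_labels.append(sec_struc[-1])
--     return ss_blocks, block_labels
-- ===== SOURCE B (Python) =====
-- def get_ss_blocks(sec_struc):
--     """Partition secondary structure into contiguous blocks (boundary-finding version)."""
--     n = len(sec_struc)
--     bounds = [0] + [i for i in range(1, n) if sec_struc[i] != sec_struc[i - 1]] + [n]
--     ss_blocks, block_labels = [], []
--     for lo, hi in zip(bounds, bounds[1:]):
--         ss_blocks.append(list(range(lo, hi)))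
--         block_labels.append(sec_struc[lo])
--     return ss_blocks, block_labels
-- ===== Notes on version B (the rewrite author's own statement) =====
-- stated objective: alternative
-- what changed: Replaces A's single transition-accumulating pass (mutable current-block list) with a boundary-finding pass that collects run-start indices and then builds each block as a range between consecutive boundaries, taking each label from the run's first character.
import Mathlib
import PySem

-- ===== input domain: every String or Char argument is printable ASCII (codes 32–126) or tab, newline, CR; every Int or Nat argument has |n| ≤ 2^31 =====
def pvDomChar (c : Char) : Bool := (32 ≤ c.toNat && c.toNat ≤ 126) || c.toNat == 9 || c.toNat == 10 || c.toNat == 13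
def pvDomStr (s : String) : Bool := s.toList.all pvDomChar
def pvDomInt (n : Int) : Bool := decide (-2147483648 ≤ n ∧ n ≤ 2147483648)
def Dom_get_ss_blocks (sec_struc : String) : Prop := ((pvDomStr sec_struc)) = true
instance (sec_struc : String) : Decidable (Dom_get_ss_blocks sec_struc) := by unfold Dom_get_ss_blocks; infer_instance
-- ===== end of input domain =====

-- B replaces A's single transition-accumulating pass by a boundary-finding pass followed by
-- range construction between consecutive boundaries (alternative decomposition, same cost).


-- shared primitive: the comparison sec_struc[i] == sec_struc[i-1] (both Pythons contain it verbatim);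
-- pyGetD is exact here since every compared index lies in [0, len) on the admitted inputs
def pvEq (cs : List Char) (i : Int) : Bool :=
  PySem.List.pyGetD cs i ' ' == PySem.List.pyGetD cs (i - 1) ' '

-- ===== PORT A =====
-- loop body of A: (ss_blocks, ss_block, block_labels) updated for index i
def pvStepA (cs : List Char) (acc : List (List Int) × List Int × List String) (i : Int) :
    List (List Int) × List Int × List String :=
  if pvEq cs i then
    (acc.1, acc.2.1 ++ [i], acc.2.2)
  else
    (acc.1 ++ [acc.2.1], [i], acc.2.2 ++ [String.mk [PySem.List.pyGetD cs (i - 1) ' ']])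

def get_ss_blocks (sec_struc : String) : List (List Int) × List String :=
  let cs := sec_struc.toList
  let st := (PySem.List.pyRange 1 (cs.length : Int) 1).foldl (pvStepA cs) ([], [0], [])
  (st.1 ++ [st.2.1], st.2.2 ++ [String.mk [(PySem.List.pyGet? cs (-1)).getD ' ']])

-- ===== PORT B =====
-- loop body of B: append the range [lo, hi) and the label at lo
def pvStepB (cs : List Char) (acc : List (List Int) × List String) (pr : Int × Int) :
    List (List Int) × List String :=
  (acc.1 ++ [PySem.List.pyRange pr.1 pr.2 1], acc.2 ++ [String.mk [PySem.List.pyGetD cs pr.1 ' ']])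

def get_ss_blocks_alt (sec_struc : String) : List (List Int) × List String :=
  let cs := sec_struc.toList
  let n : Int := cs.length
  let bounds : List Int :=
    0 :: ((PySem.List.pyRange 1 n 1).filter (fun i => !pvEq cs i) ++ [n])
  (bounds.zip bounds.tail).foldl (pvStepB cs) ([], [])

-- ===== PRECONDITION & SPEC =====
-- Pre_ excludes exactly the empty string, on which both Pythons raise IndexError
def Pre_get_ss_blocks (sec_struc : String) : Prop := sec_struc ≠ ""
instance (sec_struc : String) : Decidable (Pre_get_ss_blocks sec_struc) := by unfold Pre_get_ss_blocks; infer_instance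
def pvWitness_get_ss_blocks : String := "HHEEC"
def Spec_get_ss_blocks (sec_struc : String) (out : List (List Int) × List String) : Prop := out = get_ss_blocks_alt sec_struc
instance (sec_struc : String) (out : List (List Int) × List String) : Decidable (Spec_get_ss_blocks sec_struc out) := by unfold Spec_get_ss_blocks; infer_instance

-- ===== CLAIM (what is proved, stated in full; the proofs are below) =====
def Claim_equal_get_ss_blocks : Prop := ∀ (sec_struc : String), Dom_get_ss_blocks sec_struc → Pre_get_ss_blocks sec_struc → Spec_get_ss_blocks sec_struc (get_ss_blocks sec_struc)

-- ===== LEMMAS AND PROOFS =====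

-- transitions found so far (B's comprehension restricted to range(1, m))
def pvTrans (cs : List Char) (m : Nat) : List Int :=
  (PySem.List.pyRange 1 (m : Int) 1).filter (fun i => !pvEq cs i)

-- B's whole loop as a function of the bounds list
def pvRuns (cs : List Char) (bs : List Int) : List (List Int) × List String :=
  (bs.zip bs.tail).foldl (pvStepB cs) ([], [])

lemma zip_tail_append_last {α : Type} (xs : List α) (y : α) (h : xs ≠ []) :
    (xs ++ [y]).zip (xs ++ [y]).tail = xs.zip xs.tail ++ [(xs.getLast h, y)] := by
  induction xs with
  | nil => simp at h
  | cons a t ih =>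
    cases t with
    | nil => simp
    | cons b t' =>
      have := ih (by simp)
      simp only [List.cons_append, List.zip_cons_cons, List.tail_cons] at this ⊢
      rw [List.getLast_cons (by simp)]
      simp [this]

lemma pvRuns_snoc (cs : List Char) (bs0 : List Int) (l y : Int) :
    pvRuns cs ((bs0 ++ [l]) ++ [y]) =
      ((pvRuns cs (bs0 ++ [l])).1 ++ [PySem.List.pyRange l y 1],
       (pvRuns cs (bs0 ++ [l])).2 ++ [String.mk [PySem.List.pyGetD cs l ' ']]) := by
  unfold pvRuns
  rw [zip_tail_append_last (bs0 ++ [l]) y (by simp), List.foldl_append,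
      List.getLast_append_singleton]
  rfl

lemma pvTrans_succ (cs : List Char) (m : Nat) (hm : 1 ≤ m) :
    pvTrans cs (m + 1) = pvTrans cs m ++ (if pvEq cs (m : Int) then [] else [(m : Int)]) := by
  unfold pvTrans
  rw [show (((m + 1 : Nat) : Int)) = (m : Int) + 1 by push_cast; ring,
      PySem.List.pyRange_one_succ_right (by exact_mod_cast hm), List.filter_append]
  by_cases h : pvEq cs (m : Int) <;> simp [h]

-- the loop invariant for A's fold, in terms of B's bounds machinery:
-- the bounds list splits as bs0 ++ [l] with l the start of the current run
lemma invA (cs : List Char) (m : Nat) (hm : 1 ≤ m) :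
    ∃ (bs0 : List Int) (l : Int),
      0 :: pvTrans cs m = bs0 ++ [l]
      ∧ (PySem.List.pyRange 1 (m : Int) 1).foldl (pvStepA cs) ([], [0], []) =
          ((pvRuns cs (bs0 ++ [l])).1, PySem.List.pyRange l (m : Int) 1, (pvRuns cs (bs0 ++ [l])).2)
      ∧ PySem.List.pyGetD cs ((m : Int) - 1) ' ' = PySem.List.pyGetD cs l ' '
      ∧ l ≤ (m : Int) - 1 := by
  induction m with
  | zero => omega
  | succ k ih =>
    rcases Nat.lt_or_ge k 1 with hk | hk
    · -- base case m = 1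
      have hk0 : k = 0 := by omega
      subst hk0
      refine ⟨[], 0, ?_, ?_, by norm_num, by norm_num⟩
      · unfold pvTrans
        rw [PySem.List.pyRange_one_eq_nil (by norm_num)]
        rfl
      · have h1 : PySem.List.pyRange 1 ((1 : Nat) : Int) 1 = [] := by decide
        have h2 : PySem.List.pyRange 0 ((1 : Nat) : Int) 1 = [0] := by decide
        rw [h1, h2]
        rfl
    · obtain ⟨bs0, l, hsplit, h1, h2, h3⟩ := ih hk
      have hcast : (((k + 1 : Nat)) : Int) = (k : Int) + 1 := by push_cast; ring
      have hrange : PySem.List.pyRange 1 ((k + 1 : Nat) : Int) 1 =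
          PySem.List.pyRange 1 (k : Int) 1 ++ [(k : Int)] := by
        rw [hcast, PySem.List.pyRange_one_succ_right (by exact_mod_cast hk)]
      by_cases heq : pvEq cs (k : Int)
      · -- same char as predecessor: the current block extends, bounds unchanged
        have htr : pvTrans cs (k + 1) = pvTrans cs k := by
          rw [pvTrans_succ cs k hk, if_pos heq, List.append_nil]
        have hEq : PySem.List.pyGetD cs (k : Int) ' ' = PySem.List.pyGetD cs ((k : Int) - 1) ' ' := by
          have h := heq; unfold pvEq at h; exact beq_iff_eq.mp h
        refine ⟨bs0, l, by rw [htr]; exact hsplit, ?_, ?_, by rw [hcast]; omega⟩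
        · rw [hrange, List.foldl_append, h1]
          simp only [List.foldl_cons, List.foldl_nil, pvStepA, if_pos heq]
          rw [hcast, PySem.List.pyRange_one_succ_right (by omega)]
        · rw [hcast, show ((k : Int) + 1 - 1) = (k : Int) by ring]
          exact hEq.trans h2
      · -- transition at k: the block is closed and a new bound k is recorded
        have htr : pvTrans cs (k + 1) = pvTrans cs k ++ [(k : Int)] := by
          rw [pvTrans_succ cs k hk, if_neg heq]
        refine ⟨bs0 ++ [l], (k : Int), ?_, ?_, ?_, by rw [hcast]; omega⟩
        · rw [htr, ← List.cons_append, hsplit]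
        · rw [hrange, List.foldl_append, h1]
          simp only [List.foldl_cons, List.foldl_nil, pvStepA, if_neg heq]
          rw [pvRuns_snoc, h2, hcast, PySem.List.pyRange_one_singleton]
        · rw [hcast, show ((k : Int) + 1 - 1) = (k : Int) by ring]

-- ===== VERDICT (by name: the statement is the Claim_ definition above) =====
theorem get_ss_blocks_spec : Claim_equal_get_ss_blocks := by
  intro s _ hpre
  unfold Spec_get_ss_blocks get_ss_blocks get_ss_blocks_alt
  set cs := s.toList with hcs
  have hne : cs ≠ [] := fun h => hpre (String.toList_eq_nil_iff.mp h)
  have hlen : 1 ≤ cs.length := List.length_pos_of_ne_nil hne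
  obtain ⟨bs0, l, hsplit, h1, h2, h3⟩ := invA cs cs.length hlen
  simp only [h1]
  have hbs : (0 :: ((PySem.List.pyRange 1 (cs.length : Int) 1).filter (fun i => !pvEq cs i) ++ [(cs.length : Int)]))
      = (bs0 ++ [l]) ++ [(cs.length : Int)] := by
    rw [← hsplit, pvTrans]
    simp
  rw [show ((0 :: ((PySem.List.pyRange 1 (cs.length : Int) 1).filter (fun i => !pvEq cs i) ++ [(cs.length : Int)])).zip
        (0 :: ((PySem.List.pyRange 1 (cs.length : Int) 1).filter (fun i => !pvEq cs i) ++ [(cs.length : Int)])).tail).foldl (pvStepB cs) ([], [])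
      = pvRuns cs ((bs0 ++ [l]) ++ [(cs.length : Int)]) by rw [← hbs]; rfl]
  rw [pvRuns_snoc]
  -- remaining: the final label of A (index -1) equals the final label of B (the run start l)
  have hlabel : (PySem.List.pyGet? cs (-1)).getD ' ' = PySem.List.pyGetD cs l ' ' := by
    rw [← h2, PySem.List.pyGet?_neg_one]
    have h0 : (0 : Int) ≤ (cs.length : Int) - 1 := by omega
    have htn : ((cs.length : Int) - 1).toNat = cs.length - 1 := by omega
    rw [PySem.List.pyGetD, PySem.List.pyGet?_of_nonneg cs h0, htn, List.getLast?_eq_getElem?]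
  rw [hlabel]
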